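-- pv_equiv track=rewrite | github.com/Lightblues/Leetcode | contest/301-350/317.py | makeIntegerBeautiful
-- ===== SOURCE A (Python) =====
-- def makeIntegerBeautiful(n: int, target: int) -> int:
--     # from 灵神的代码: 考虑进位最后得到的数字是什么
--     tail = 1        # 每次考察的位
--     while True:
--         m = x = n + (tail - n % tail) % tail  # 进位后的数字
--         s = 0
--         while x:
--             s += x % 10
--             x //= 10
--         if s <= target: return m - n
--         tail *= 10
-- ===== SOURCE B (Python) =====
-- def makeIntegerBeautiful(n: int, target: int) -> int:
--     # digit-array greedy: explode n into a little-endian digit list once, then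
--     # zero out digits from the bottom with explicit carry propagation, keeping
--     # the digit sum updated incrementally instead of recomputing it each round
--     digits = []
--     x = n
--     while x:
--         digits.append(x % 10)
--         x //= 10
--     s = sum(digits)
--     i = 0
--     while s > target:
--         if digits[i]:
--             s -= digits[i] - 1
--             digits[i] = 0
--             j = i + 1
--             while j < len(digits) and digits[j] == 9:
--                 s -= 9
--                 digits[j] = 0
--                 j += 1
--             if j == len(digits):
--                 digits.append(1)
--             else:
--                 digits[j] += 1
--         i += 1
--     m = 0
--     for d in reversed(digits):
--         m = m * 10 + d
--     return m - n
-- ===== Notes on version B (the rewrite author's own statement) =====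
-- stated objective: alternative
-- what changed: B replaces A's per-round modular round-up (m = n + (tail - n%tail)%tail) and full digit-sum recomputation by a little-endian digit array built once, zeroing digits bottom-up with explicit carry propagation and an incrementally maintained digit sum, reconstructing the number only at the end.
import Mathlib
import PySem

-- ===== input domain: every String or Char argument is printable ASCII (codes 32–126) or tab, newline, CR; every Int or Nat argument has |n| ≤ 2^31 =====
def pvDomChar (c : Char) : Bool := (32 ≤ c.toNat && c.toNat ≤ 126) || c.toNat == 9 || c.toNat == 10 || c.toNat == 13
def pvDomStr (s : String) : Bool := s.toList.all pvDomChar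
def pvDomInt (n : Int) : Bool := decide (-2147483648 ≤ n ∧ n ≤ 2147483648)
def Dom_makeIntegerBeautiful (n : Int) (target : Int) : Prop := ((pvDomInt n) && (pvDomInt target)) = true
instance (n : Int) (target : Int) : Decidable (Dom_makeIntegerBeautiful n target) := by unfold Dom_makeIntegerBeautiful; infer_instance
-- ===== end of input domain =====

-- B replaces A's per-round modular round-up and digit-sum recomputation by a little-endian
-- digit array built once, zeroed bottom-up with explicit carry propagation and an incrementally
-- maintained digit sum (objective: alternative algorithm, same results).
-- Both Python whiles are unbounded; the ports use fuel 64, never exhausted on Pre_ ∩ Dom_.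

-- ===== PORT A =====
-- inner 'while x: s += x % 10; x //= 10' (fuel guard only makes it total)
def pvDigitLoop : Nat → Int → Int → Int
  | 0, _, s => s
  | f + 1, x, s => if x ≠ 0 then pvDigitLoop f (PySem.Int.floordiv x 10) (s + PySem.Int.mod x 10) else s

-- outer 'while True' of A, fuel-guarded
def pvLoopA (n target : Int) : Nat → Int → Int
  | 0, _ => 0
  | f + 1, tail =>
    let m := n + PySem.Int.mod (tail - PySem.Int.mod n tail) tail
    let s := pvDigitLoop 64 m 0
    if s ≤ target then m - n else pvLoopA n target f (tail * 10)

def makeIntegerBeautiful (n : Int) (target : Int) : Int := pvLoopA n target 64 1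

-- ===== PORT B =====
-- 'while x: digits.append(x % 10); x //= 10'
def pvBuildDigits : Nat → Int → List Int → List Int
  | 0, _, ds => ds
  | f + 1, x, ds => if x ≠ 0 then pvBuildDigits f (PySem.Int.floordiv x 10) (ds ++ [PySem.Int.mod x 10]) else ds

-- inner 'while j < len(digits) and digits[j] == 9: s -= 9; digits[j] = 0; j += 1'
def pvCarryLoop : Nat → List Int → Int → Nat → List Int × Int × Nat
  | 0, ds, s, j => (ds, s, j)
  | f + 1, ds, s, j =>
    if j < ds.length ∧ ds.getD j 0 = 9 then pvCarryLoop f (ds.set j 0) (s - 9) (j + 1)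
    else (ds, s, j)

-- outer 'while s > target' of B; digits[i] is pyGet? (IndexError only outside Pre_)
def pvLoopB (target : Int) : Nat → List Int → Int → Nat → List Int
  | 0, ds, _, _ => ds
  | f + 1, ds, s, i =>
    if s > target then
      if (PySem.List.pyGet? ds (i : Int)).getD 0 ≠ 0 then
        let d := ds.getD i 0
        let ds1 := ds.set i 0
        let s1 := s - (d - 1)
        let r := pvCarryLoop 64 ds1 s1 (i + 1)
        if r.2.2 = r.1.length then pvLoopB target f (r.1 ++ [1]) r.2.1 (i + 1)
        else pvLoopB target f (r.1.set r.2.2 (r.1.getD r.2.2 0 + 1)) r.2.1 (i + 1)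
      else pvLoopB target f ds s (i + 1)
    else ds

def makeIntegerBeautiful_alt (n : Int) (target : Int) : Int :=
  let ds := pvBuildDigits 64 n []
  let s := ds.sum
  let ds' := pvLoopB target 64 ds s 0
  (ds'.reverse.foldl (fun m d => m * 10 + d) 0) - n

-- ===== PRECONDITION & SPEC =====
-- A (and B) loop forever when n < 0 (A's inner digit loop never reaches 0), and when the digit
-- sum can never drop to target (n > 0 with target ≤ 0, or n = 0 with target < 0); Pre_ is exactly
-- the inputs where the Python A returns.
def Pre_makeIntegerBeautiful (n : Int) (target : Int) : Prop := 0 ≤ n ∧ (1 ≤ target ∨ (n = 0 ∧ 0 ≤ target))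
instance (n : Int) (target : Int) : Decidable (Pre_makeIntegerBeautiful n target) := by unfold Pre_makeIntegerBeautiful; infer_instance
def pvWitness_makeIntegerBeautiful : Int × Int := (467, 6)

def Spec_makeIntegerBeautiful (n : Int) (target : Int) (out : Int) : Prop := out = makeIntegerBeautiful_alt n target
instance (n : Int) (target : Int) (out : Int) : Decidable (Spec_makeIntegerBeautiful n target out) := by unfold Spec_makeIntegerBeautiful; infer_instance

-- ===== CLAIM (what is proved, stated in full; the proofs are below) =====
def Claim_equal_makeIntegerBeautiful : Prop := ∀ (n : Int) (target : Int), Dom_makeIntegerBeautiful n target → Pre_makeIntegerBeautiful n target → Spec_makeIntegerBeautiful n target (makeIntegerBeautiful n target)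

-- ===== LEMMAS AND PROOFS =====

-- the value of a little-endian digit list
def pvVal (ds : List Int) : Int := ds.foldr (fun d m => m * 10 + d) 0

-- all entries are decimal digits
def pvOK (ds : List Int) : Prop := ∀ d ∈ ds, 0 ≤ d ∧ d ≤ 9

-- the ceiling quotient ceil(n / 10^k) (proof-only helper)
def pvCeilQ (n : Int) (k : Nat) : Int := (n + 10 ^ k - 1) / 10 ^ k

theorem pvVal_nil : pvVal [] = 0 := rfl
theorem pvVal_cons (d : Int) (t : List Int) : pvVal (d :: t) = pvVal t * 10 + d := rfl

theorem pvVal_nonneg (ds : List Int) (h : pvOK ds) : 0 ≤ pvVal ds := by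
  induction ds with
  | nil => simp [pvVal_nil]
  | cons d t ih =>
      have hd := h d (by simp)
      have ht := ih (fun x hx => h x (by simp [hx]))
      rw [pvVal_cons]; omega

theorem pvVal_zero_sum (ds : List Int) (h : pvOK ds) (hv : pvVal ds = 0) : ds.sum = 0 := by
  induction ds with
  | nil => simp
  | cons d t ih =>
      have hd := h d (by simp)
      have ht : pvOK t := fun x hx => h x (by simp [hx])
      have htn := pvVal_nonneg t ht
      rw [pvVal_cons] at hv
      have hd0 : d = 0 := by omega
      have ht0 : pvVal t = 0 := by omega
      simp [hd0, ih ht ht0]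

theorem pvVal_lower (ds : List Int) (h : pvOK ds) (hne : 1 ≤ ds.length)
    (hlast : ds.getD (ds.length - 1) 0 ≠ 0) : 10 ^ (ds.length - 1) ≤ pvVal ds := by
  induction ds with
  | nil => simp at hne
  | cons d t ih =>
      have hd := h d (by simp)
      have ht : pvOK t := fun x hx => h x (by simp [hx])
      cases t with
      | nil =>
          have h2 : d ≠ 0 := by simpa using hlast
          have h3 : (10:Int) ^ (([d] : List Int).length - 1) = 1 := by norm_num
          have hv : pvVal [d] = d := by simp [pvVal_cons, pvVal_nil]
          rw [h3, hv]
          omega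
      | cons e u =>
          have hlen : (d :: e :: u).length - 1 = (e :: u).length - 1 + 1 := by simp
          rw [hlen] at hlast
          have hlast' : (e :: u).getD ((e :: u).length - 1) 0 ≠ 0 := by
            simpa using hlast
          have := ih ht (by simp) hlast'
          rw [pvVal_cons, hlen, pow_succ]
          have := pvVal_nonneg (e :: u) ht
          nlinarith [pow_pos (by norm_num : (0:Int) < 10) ((e :: u).length - 1)]

theorem pvVal_drop (k : Nat) : ∀ (ds : List Int), (∀ i < k, ds.getD i 0 = 0) →
    pvVal ds = 10 ^ k * pvVal (ds.drop k) := by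
  induction k with
  | zero => intro ds _; simp
  | succ k ih =>
      intro ds h
      cases ds with
      | nil => simp [pvVal_nil]
      | cons d t =>
          have hd : d = 0 := by have := h 0 (by omega); simpa using this
          have ht := ih t (fun i hi => by have := h (i + 1) (by omega); simpa using this)
          rw [pvVal_cons, hd, ht, List.drop_succ_cons]
          ring

theorem pvVal_set : ∀ (ds : List Int) (j : Nat) (x : Int), j < ds.length →
    pvVal (ds.set j x) = pvVal ds + (x - ds.getD j 0) * 10 ^ j := by
  intro ds
  induction ds with
  | nil => intro j x h; simp at h
  | cons d t ih =>
      intro j x h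
      cases j with
      | zero => simp [pvVal_cons]
      | succ j =>
          have := ih j x (by simpa using h)
          simp [pvVal_cons, List.set_cons_succ, this]
          ring

theorem pvSum_set : ∀ (ds : List Int) (j : Nat) (x : Int), j < ds.length →
    (ds.set j x).sum = ds.sum + x - ds.getD j 0 := by
  intro ds
  induction ds with
  | nil => intro j x h; simp at h
  | cons d t ih =>
      intro j x h
      cases j with
      | zero => simp; ring
      | succ j =>
          have := ih j x (by simpa using h)
          simp [List.set_cons_succ, this]
          ring

theorem pvGetD_set_ne : ∀ (ds : List Int) (j i : Nat) (x : Int), i ≠ j →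
    (ds.set j x).getD i 0 = ds.getD i 0 := by
  intro ds
  induction ds with
  | nil => intro j i x _; simp
  | cons d t ih =>
      intro j i x hij
      cases j with
      | zero => cases i with
          | zero => omega
          | succ i => simp
      | succ j => cases i with
          | zero => simp
          | succ i =>
              have := ih j i x (by omega)
              simpa [List.set_cons_succ, List.getD] using this

theorem pvGetD_set_self : ∀ (ds : List Int) (j : Nat) (x : Int), j < ds.length →
    (ds.set j x).getD j 0 = x := by
  intro ds
  induction ds with
  | nil => intro j x h; simp at h
  | cons d t ih =>
      intro j x h
      cases j with
      | zero => simp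
      | succ j =>
          have := ih j x (by simpa using h)
          simpa [List.set_cons_succ, List.getD] using this

theorem pvGetD_mem (ds : List Int) (i : Nat) (h : i < ds.length) : ds.getD i 0 ∈ ds := by
  rw [List.getD_eq_getElem ds 0 h]
  exact List.getElem_mem h

theorem pvOK_set (ds : List Int) (j : Nat) (x : Int) (h : pvOK ds) (hx : 0 ≤ x ∧ x ≤ 9) :
    pvOK (ds.set j x) := by
  intro d hd
  rcases List.mem_or_eq_of_mem_set hd with h1 | rfl
  · exact h d h1
  · exact hx

theorem pvVal_append (ds : List Int) (x : Int) :
    pvVal (ds ++ [x]) = pvVal ds + x * 10 ^ ds.length := by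
  induction ds with
  | nil => simp [pvVal_nil, pvVal_cons]
  | cons d t ih => simp [pvVal_cons, ih]; ring

theorem pvGetD_append_left : ∀ (ds : List Int) (x : Int) (i : Nat), i < ds.length →
    (ds ++ [x]).getD i 0 = ds.getD i 0 := by
  intro ds
  induction ds with
  | nil => intro x i h; simp at h
  | cons d t ih =>
      intro x i h
      cases i with
      | zero => simp
      | succ i => simpa using ih x i (by simpa using h)

theorem pvGetD_append_last : ∀ (ds : List Int) (x : Int), (ds ++ [x]).getD ds.length 0 = x := by
  intro ds
  induction ds with
  | nil => intro x; simp
  | cons d t ih => intro x; simpa using ih x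

-- digit-sum loop computes the sum of a bounded digit list of its value
theorem pvDigitLoop_zero (f : Nat) (s : Int) : pvDigitLoop f 0 s = s := by
  cases f <;> simp [pvDigitLoop]

theorem pvDigitLoop_val : ∀ (ds : List Int) (f : Nat) (s : Int), pvOK ds → ds.length ≤ f →
    pvDigitLoop f (pvVal ds) s = s + ds.sum := by
  intro ds
  induction ds with
  | nil => intro f s _ _; simp [pvVal_nil, pvDigitLoop_zero]
  | cons d t ih =>
      intro f s hok hf
      have hd := hok d (by simp)
      have ht : pvOK t := fun x hx => hok x (by simp [hx])
      have htn := pvVal_nonneg t ht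
      obtain ⟨f, rfl⟩ : ∃ f', f = f' + 1 := ⟨f - 1, by simp at hf; omega⟩
      by_cases hv : pvVal (d :: t) = 0
      · rw [hv, pvDigitLoop_zero]
        have := pvVal_zero_sum (d :: t) hok hv
        omega
      · rw [pvVal_cons] at hv ⊢
        have h10 : (0:Int) < 10 := by norm_num
        simp only [pvDigitLoop, if_pos hv]
        rw [PySem.Int.floordiv_eq_ediv_of_pos h10, PySem.Int.mod_eq_emod_of_pos h10]
        have he : pvVal t * 10 + d = d + 10 * pvVal t := by ring
        rw [he]
        rw [Int.add_mul_emod_self_left, Int.emod_eq_of_lt (by omega) (by omega)]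
        rw [Int.add_mul_ediv_left _ _ (by norm_num : (10:Int) ≠ 0),
          Int.ediv_eq_zero_of_lt (by omega) (by omega), zero_add]
        rw [ih f (s + d) ht (by simp at hf; omega)]
        simp; ring

-- reconstruction pass equals the value
theorem pvReconstruct (ds : List Int) :
    ds.reverse.foldl (fun m d => m * 10 + d) 0 = pvVal ds := by
  rw [List.foldl_reverse]; rfl

-- ceiling-quotient facts (shared arithmetic layer)
theorem pvCeilQ_zero (n : Int) : pvCeilQ n 0 = n := by unfold pvCeilQ; simp

-- A's round-up equals the ceiling quotient times the power
theorem pvRoundUp_eq (n : Int) (k : Nat) :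
    n + PySem.Int.mod ((10:Int) ^ k - PySem.Int.mod n (10 ^ k)) (10 ^ k) = pvCeilQ n k * 10 ^ k := by
  have ht : (0:Int) < 10 ^ k := by positivity
  simp only [PySem.Int.mod_eq_emod_of_pos ht]
  set t : Int := 10 ^ k with htdef
  have hd := Int.mul_ediv_add_emod n t
  have hm0 := Int.emod_nonneg n (by omega : t ≠ 0)
  have hml := Int.emod_lt_of_pos n ht
  set q : Int := n / t with hq
  set r : Int := n % t with hr0
  by_cases hr : r = 0
  · rw [show t - r = t by omega, Int.emod_self]
    have hceil : pvCeilQ n k = q := by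
      unfold pvCeilQ
      rw [← htdef]
      have e : n + t - 1 = (t - 1) + t * q := by linear_combination -hd + hr
      rw [e, Int.add_mul_ediv_left _ _ (by omega : t ≠ 0),
        Int.ediv_eq_zero_of_lt (by omega) (by omega)]
      ring
    rw [hceil]
    linear_combination -hd + hr
  · rw [Int.emod_eq_of_lt (by omega) (by omega)]
    have hceil : pvCeilQ n k = q + 1 := by
      unfold pvCeilQ
      rw [← htdef]
      have e : n + t - 1 = (r - 1) + t * (q + 1) := by linear_combination -hd
      rw [e, Int.add_mul_ediv_left _ _ (by omega : t ≠ 0),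
        Int.ediv_eq_zero_of_lt (by omega) (by omega)]
      ring
    rw [hceil]
    linear_combination -hd

-- q = digit-shifted decomposition: ceilQ at k+1 from ceilQ at k
theorem pvCeilQ_succ (n : Int) (k : Nat) :
    pvCeilQ n (k + 1) = (pvCeilQ n k + 9) / 10 := by
  have ht : (0:Int) < 10 ^ k := by positivity
  unfold pvCeilQ
  set t : Int := 10 ^ k with htdef
  have h1 : (n + t - 1) / t + 9 = (n + t - 1 + t * 9) / t :=
    (Int.add_mul_ediv_left _ _ (by omega : t ≠ 0)).symm
  rw [h1, show n + t - 1 + t * 9 = n + t * 10 - 1 by ring,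
    show (10:Int) ^ (k + 1) = t * 10 by rw [htdef]; ring,
    ← Int.ediv_ediv_of_nonneg (by omega)]

theorem pvCeilQ_pos (n : Int) (k : Nat) (hn : 1 ≤ n) : 1 ≤ pvCeilQ n k := by
  have ht : (0:Int) < 10 ^ k := by positivity
  unfold pvCeilQ
  have := Int.le_ediv_iff_mul_le ht (a := 1) (b := n + 10 ^ k - 1)
  rw [this]; omega

theorem pvCeilQ_mul_le (n : Int) (k : Nat) : pvCeilQ n k * 10 ^ k ≤ n + 10 ^ k - 1 := by
  have ht : (10:Int) ^ k ≠ 0 := by positivity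
  exact Int.ediv_mul_le _ ht

-- carry-loop specification
theorem pvCarry_spec : ∀ (f : Nat) (ds : List Int) (s : Int) (j : Nat), pvOK ds →
    j ≤ ds.length → ds.length - j ≤ f →
    pvOK (pvCarryLoop f ds s j).1 ∧
    (pvCarryLoop f ds s j).1.length = ds.length ∧
    j ≤ (pvCarryLoop f ds s j).2.2 ∧
    (pvCarryLoop f ds s j).2.2 ≤ ds.length ∧
    (∀ i, i < j → (pvCarryLoop f ds s j).1.getD i 0 = ds.getD i 0) ∧
    (∀ i, (pvCarryLoop f ds s j).2.2 ≤ i → (pvCarryLoop f ds s j).1.getD i 0 = ds.getD i 0) ∧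
    pvVal (pvCarryLoop f ds s j).1 = pvVal ds - (10 ^ (pvCarryLoop f ds s j).2.2 - 10 ^ j) ∧
    (pvCarryLoop f ds s j).2.1 = s + (pvCarryLoop f ds s j).1.sum - ds.sum ∧
    ((pvCarryLoop f ds s j).2.2 = ds.length ∨ (pvCarryLoop f ds s j).1.getD (pvCarryLoop f ds s j).2.2 0 ≠ 9) := by
  intro f
  induction f with
  | zero =>
      intro ds s j hok hj hf
      have : j = ds.length := by omega
      subst this
      simp [pvCarryLoop, hok]
  | succ f ih =>
      intro ds s j hok hj hf
      by_cases hc : j < ds.length ∧ ds.getD j 0 = 9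
      · obtain ⟨hjl, h9⟩ := hc
        have hcond : j < ds.length ∧ ds.getD j 0 = 9 := ⟨hjl, h9⟩
        have hok' : pvOK (ds.set j 0) := pvOK_set ds j 0 hok (by omega)
        have hlen' : (ds.set j 0).length = ds.length := by simp
        have := ih (ds.set j 0) (s - 9) (j + 1) hok' (by simp; omega) (by simp; omega)
        have hstep : pvCarryLoop (f + 1) ds s j = pvCarryLoop f (ds.set j 0) (s - 9) (j + 1) := by
          simp only [pvCarryLoop, if_pos hcond]
        rw [hstep]
        obtain ⟨c1, c2, c3, c4, c5, c6, c7, c8, c9⟩ := this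
        refine ⟨c1, by omega, by omega, by omega, ?_, ?_, ?_, ?_, ?_⟩
        · intro i hi
          rw [c5 i (by omega), pvGetD_set_ne ds j i 0 (by omega)]
        · intro i hi
          by_cases hij : i = j
          · omega
          · rw [c6 i hi, pvGetD_set_ne ds j i 0 hij]
        · rw [c7, pvVal_set ds j 0 hjl, h9]
          have : (10:Int) ^ (j + 1) = 10 ^ j * 10 := by ring
          omega
        · rw [c8, pvSum_set ds j 0 hjl, h9]; ring
        · rcases c9 with h | h
          · left; omega
          · right; exact h
      · have hstep : pvCarryLoop (f + 1) ds s j = (ds, s, j) := by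
          simp only [pvCarryLoop, if_neg hc]
        rw [hstep]
        refine ⟨hok, rfl, le_refl j, hj, fun i _ => rfl, fun i _ => rfl, by ring, by ring, ?_⟩
        by_cases hjl : j = ds.length
        · left; exact hjl
        · right; intro h9; exact hc ⟨by omega, h9⟩

-- build loop: accumulator splits off
theorem pvBuild_acc : ∀ (f : Nat) (x : Int) (ds : List Int),
    pvBuildDigits f x ds = ds ++ pvBuildDigits f x [] := by
  intro f
  induction f with
  | zero => intro x ds; simp [pvBuildDigits]
  | succ f ih =>
      intro x ds
      by_cases hx : x = 0
      · simp [pvBuildDigits, hx]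
      · simp only [pvBuildDigits, if_pos hx]
        rw [ih _ (ds ++ [PySem.Int.mod x 10]), ih _ ([] ++ [PySem.Int.mod x 10])]
        simp

theorem pvBuild_spec : ∀ (f : Nat) (x : Int), 0 ≤ x → x < 10 ^ f →
    pvOK (pvBuildDigits f x []) ∧ pvVal (pvBuildDigits f x []) = x ∧
    (0 < x → 1 ≤ (pvBuildDigits f x []).length ∧
      (pvBuildDigits f x []).getD ((pvBuildDigits f x []).length - 1) 0 ≠ 0) := by
  intro f
  induction f with
  | zero =>
      intro x h0 h1
      have : x = 0 := by simp at h1; omega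
      subst this
      simp [pvBuildDigits, pvVal_nil, pvOK]
  | succ f ih =>
      intro x h0 h1
      by_cases hx : x = 0
      · subst hx; simp [pvBuildDigits, pvVal_nil, pvOK]
      · have h10 : (0:Int) < 10 := by norm_num
        simp only [pvBuildDigits, if_pos hx]
        rw [pvBuild_acc f (PySem.Int.floordiv x 10) _]
        simp only [List.nil_append]
        rw [PySem.Int.floordiv_eq_ediv_of_pos h10, PySem.Int.mod_eq_emod_of_pos h10]
        have hm0 := Int.emod_nonneg x (by norm_num : (10:Int) ≠ 0)
        have hml := Int.emod_lt_of_pos x h10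
        have hq0 : 0 ≤ x / 10 := Int.ediv_nonneg h0 (by norm_num)
        have hd := Int.mul_ediv_add_emod x 10
        have hql : x / 10 < 10 ^ f := by
          have hpe : (10:Int) ^ (f + 1) = 10 * 10 ^ f := by ring
          omega
        obtain ⟨bok, bval, blast⟩ := ih (x / 10) hq0 hql
        set B := pvBuildDigits f (x / 10) [] with hB
        constructor
        · intro d hd'
          simp at hd'
          rcases hd' with rfl | hd'
          · omega
          · exact bok d hd'
        constructor
        · rw [List.singleton_append, pvVal_cons, bval]; omega
        · intro _
          by_cases hq : x / 10 = 0
          · have hBnil : B = [] := by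
              rw [hB, hq]
              cases f <;> simp [pvBuildDigits]
            rw [hBnil]
            simp
            omega
          · obtain ⟨hb1, hb2⟩ := blast (by omega)
            constructor
            · simp
            · have hlen : ([x % 10] ++ B).length - 1 = (B.length - 1) + 1 := by
                simp; omega
              rw [hlen]
              simpa using hb2

-- main loop correspondence
theorem pvMain (n target : Int) (hn : 1 ≤ n) (hnb : n ≤ 2147483648) (htg : 1 ≤ target) :
    ∀ (f k : Nat) (ds : List Int) (s : Int), f + k = 64 → k ≤ 11 →
    pvOK ds → (∀ i, i < k → ds.getD i 0 = 0) → pvVal ds = pvCeilQ n k * 10 ^ k →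
    s = ds.sum → 1 ≤ ds.length → ds.getD (ds.length - 1) 0 ≠ 0 →
    pvLoopA n target f ((10:Int) ^ k) = pvVal (pvLoopB target f ds s k) - n := by
  intro f
  induction f with
  | zero => intro k ds s hfk hk; omega
  | succ f ih =>
      intro k ds s hfk hk hok hpre hval hs hne hlast
      have hq1 : 1 ≤ pvCeilQ n k := pvCeilQ_pos n k hn
      have htp : (0:Int) < 10 ^ k := by positivity
      have hkle : (10:Int) ^ k ≤ 10 ^ 11 := pow_le_pow_right₀ (by norm_num) hk
      have hvub : pvVal ds ≤ n + 10 ^ k - 1 := hval ▸ pvCeilQ_mul_le n k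
      have hvub' : pvVal ds < 10 ^ 12 := by
        have : (2147483648:Int) + 10 ^ 11 - 1 < 10 ^ 12 := by norm_num
        omega
      have hvlb : 10 ^ k ≤ pvVal ds := by
        rw [hval]; nlinarith
      have hlen64 : ds.length ≤ 64 := by
        by_contra hcon
        have h1 := pvVal_lower ds hok hne hlast
        have h2 : (10:Int) ^ 12 ≤ 10 ^ (ds.length - 1) :=
          pow_le_pow_right₀ (by norm_num) (by omega)
        omega
      -- A's m at this step is pvVal ds, and its digit sum is s
      have hm : n + PySem.Int.mod ((10:Int) ^ k - PySem.Int.mod n (10 ^ k)) (10 ^ k) = pvVal ds := by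
        rw [pvRoundUp_eq, hval]
      have hsA : pvDigitLoop 64 (pvVal ds) 0 = s := by
        rw [pvDigitLoop_val ds 64 0 hok hlen64, hs]; ring
      simp only [pvLoopA, pvLoopB, hm, hsA]
      by_cases hst : s ≤ target
      · rw [if_pos hst, if_neg (by omega)]
      · rw [if_neg hst, if_pos (by omega)]
        -- s > target forces k ≤ 10
        have hk10 : k ≤ 10 := by
          by_contra hcon
          have hk11 : k = 11 := by omega
          subst hk11
          have hqub : pvCeilQ n 11 < 2 := by
            unfold pvCeilQ
            rw [Int.ediv_lt_iff_lt_mul (by positivity)]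
            norm_num
            omega
          have hq : pvCeilQ n 11 = 1 := by omega
          rw [hq, one_mul] at hval
          have : s = pvDigitLoop 64 ((10:Int) ^ 11) 0 := by rw [← hsA, hval]
          rw [show pvDigitLoop 64 ((10:Int)^11) 0 = 1 by decide] at this
          omega
        -- k < length, so digits[k] resolves
        have hklen : k < ds.length := by
          by_contra hcon
          have hall : ∀ i, i < k → ds.getD i 0 = 0 := hpre
          have hdrop : ds.drop k = [] := by
            apply List.drop_eq_nil_of_le; omega
          have := pvVal_drop k ds hall
          rw [hdrop, pvVal_nil, mul_zero] at this
          omega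
        have hget : PySem.List.pyGet? ds (k : Int) = some (ds.getD k 0) := by
          rw [PySem.List.pyGet?_natCast, List.getElem?_eq_getElem hklen,
            List.getD_eq_getElem ds 0 hklen]
        set d := ds.getD k 0 with hd
        have hdb : 0 ≤ d ∧ d ≤ 9 := hok d (pvGetD_mem ds k hklen)
        -- q decomposition: q = 10 * (q/10) + d
        have hdropcons : ds.drop k = d :: ds.drop (k + 1) := by
          rw [hd, List.getD_eq_getElem ds 0 hklen]
          exact (List.getElem_cons_drop hklen).symm
        have hqval : pvCeilQ n k = pvVal (ds.drop k) := by
          have h1 := pvVal_drop k ds hpre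
          rw [hval] at h1
          have h2 : (10:Int) ^ k * pvCeilQ n k = 10 ^ k * pvVal (ds.drop k) := by
            rw [mul_comm ((10:Int) ^ k)]; exact h1
          exact mul_left_cancel₀ (by positivity) h2
        have hqdec : pvCeilQ n k = pvVal (ds.drop (k + 1)) * 10 + d := by
          rw [hqval, hdropcons, pvVal_cons]
        by_cases hd0 : d = 0
        · -- digit already zero: nothing changes this round
          rw [hget]
          simp only [Option.getD_some]
          rw [if_neg (by simp [hd0])]
          have hceil : pvCeilQ n (k + 1) = pvVal (ds.drop (k + 1)) := by
            rw [pvCeilQ_succ, hqdec, hd0, add_zero]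
            rw [show pvVal (ds.drop (k+1)) * 10 + 9 = 9 + 10 * pvVal (ds.drop (k+1)) by ring]
            rw [Int.add_mul_ediv_left _ _ (by norm_num : (10:Int) ≠ 0)]
            norm_num
          have hval' : pvVal ds = pvCeilQ n (k + 1) * 10 ^ (k + 1) := by
            rw [hceil]
            have h1 := pvVal_drop (k + 1) ds (by
              intro i hi
              by_cases hik : i = k
              · rw [hik, ← hd, hd0]
              · exact hpre i (by omega))
            rw [h1]; ring
          have := ih (k + 1) ds s (by omega) (by omega) hok
            (by
              intro i hi
              by_cases hik : i = k
              · rw [hik, ← hd, hd0]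
              · exact hpre i (by omega))
            hval' hs hne hlast
          exact this
        · -- zero digit k, carry into k+1
          rw [hget]
          simp only [Option.getD_some]
          rw [if_pos (by exact hd0)]
          set ds1 := ds.set k 0 with hds1
          set s1 := s - (d - 1) with hs1
          have hok1 : pvOK ds1 := pvOK_set ds k 0 hok (by omega)
          have hlen1 : ds1.length = ds.length := by simp [hds1]
          have hval1 : pvVal ds1 = pvVal ds - d * 10 ^ k := by
            rw [hds1, pvVal_set ds k 0 hklen, ← hd]; ring
          have hsum1 : ds1.sum = ds.sum - d := by
            rw [hds1, pvSum_set ds k 0 hklen, ← hd]; ring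
          obtain ⟨c1, c2, c3, c4, c5, c6, c7, c8, c9⟩ :=
            pvCarry_spec 64 ds1 s1 (k + 1) hok1 (by omega) (by omega)
          set r := pvCarryLoop 64 ds1 s1 (k + 1) with hr
          -- target ceiling value for step k+1
          have hceil : pvCeilQ n (k + 1) = pvVal (ds.drop (k + 1)) + 1 := by
            rw [pvCeilQ_succ, hqdec]
            rw [show pvVal (ds.drop (k+1)) * 10 + d + 9 = (d + 9) + 10 * pvVal (ds.drop (k+1)) by ring]
            rw [Int.add_mul_ediv_left _ _ (by norm_num : (10:Int) ≠ 0)]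
            rw [show (d + 9) / 10 = 1 from by omega]
            ring
          have hvgoal : pvVal ds - d * 10 ^ k + 10 ^ (k + 1) = pvCeilQ n (k + 1) * 10 ^ (k + 1) := by
            rw [hceil]
            have h1 := pvVal_drop k ds hpre
            rw [hdropcons, pvVal_cons] at h1
            rw [h1]; ring
          -- new state facts common to both branches
          have hprenew : ∀ i, i < k + 1 → r.1.getD i 0 = 0 := by
            intro i hi
            rw [c5 i (by omega)]
            by_cases hik : i = k
            · rw [hik, hds1, pvGetD_set_self ds k 0 hklen]
            · rw [hds1, pvGetD_set_ne ds k i 0 hik]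
              exact hpre i (by omega)
          have hsr : r.2.1 = r.1.sum + 1 := by
            rw [c8, hs1, hs, hsum1]; ring
          by_cases hend : r.2.2 = r.1.length
          · -- append branch
            rw [if_pos hend]
            have hj' : r.2.2 = ds.length := by omega
            have hvnew : pvVal (r.1 ++ [1]) = pvCeilQ n (k + 1) * 10 ^ (k + 1) := by
              rw [pvVal_append, c7, hval1, one_mul, c2, hlen1, ← hj']
              omega
            have hoknew : pvOK (r.1 ++ [1]) := by
              intro x hx
              simp at hx
              rcases hx with hx | rfl
              · exact c1 x hx
              · omega
            have hsnew : r.2.1 = (r.1 ++ [1]).sum := by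
              rw [hsr]; simp
            have hprenew' : ∀ i, i < k + 1 → (r.1 ++ [1]).getD i 0 = 0 := by
              intro i hi
              rw [pvGetD_append_left r.1 1 i (by omega)]
              exact hprenew i hi
            have hlastnew : (r.1 ++ [1]).getD ((r.1 ++ [1]).length - 1) 0 ≠ 0 := by
              have : (r.1 ++ [1]).length - 1 = r.1.length := by simp
              rw [this, pvGetD_append_last]
              norm_num
            have := ih (k + 1) (r.1 ++ [1]) r.2.1 (by omega) (by omega) hoknew hprenew' hvnew
              hsnew (by simp) hlastnew
            exact this
          · -- increment branch
            rw [if_neg hend]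
            have hj'lt : r.2.2 < ds.length := by omega
            set e := r.1.getD r.2.2 0 with he
            have hene : e ≠ 9 := by
              rcases c9 with h | h
              · omega
              · exact h
            have hemem : e ∈ r.1 := by
              rw [he]; exact pvGetD_mem r.1 r.2.2 (by omega)
            have heb := c1 e hemem
            set ds2 := r.1.set r.2.2 (e + 1) with hds2
            have hok2 : pvOK ds2 := pvOK_set r.1 r.2.2 (e + 1) c1 (by omega)
            have hlen2 : ds2.length = ds.length := by simp [hds2]; omega
            have hvnew : pvVal ds2 = pvCeilQ n (k + 1) * 10 ^ (k + 1) := by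
              rw [hds2, pvVal_set r.1 r.2.2 (e + 1) (by omega), ← he, c7, hval1]
              rw [show (e + 1 - e) = 1 by ring, one_mul]
              omega
            have hsnew : r.2.1 = ds2.sum := by
              rw [hds2, pvSum_set r.1 r.2.2 (e + 1) (by omega), ← he, hsr]; ring
            have hprenew' : ∀ i, i < k + 1 → ds2.getD i 0 = 0 := by
              intro i hi
              rw [hds2, pvGetD_set_ne r.1 r.2.2 i (e + 1) (by omega)]
              exact hprenew i hi
            have hlastnew : ds2.getD (ds2.length - 1) 0 ≠ 0 := by
              by_cases hjtop : r.2.2 = ds.length - 1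
              · have hpos : ds2.length - 1 = r.2.2 := by omega
                rw [hpos, hds2, pvGetD_set_self r.1 r.2.2 (e + 1) (by omega)]
                omega
              · rw [hlen2, hds2, pvGetD_set_ne r.1 r.2.2 (ds.length - 1) (e + 1) (by omega)]
                rw [c6 (ds.length - 1) (by omega)]
                rw [hds1, pvGetD_set_ne ds k (ds.length - 1) 0 (by omega)]
                exact hlast
            have := ih (k + 1) ds2 r.2.1 (by omega) (by omega) hok2 hprenew' hvnew
              hsnew (by omega) hlastnew
            exact this

-- one-step unfoldings with a variable fuel (avoid numeral-matching recursion in simp)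
theorem pvLoopA_step (n target : Int) (f : Nat) (tail : Int) :
    pvLoopA n target (f + 1) tail =
      if pvDigitLoop 64 (n + PySem.Int.mod (tail - PySem.Int.mod n tail) tail) 0 ≤ target
      then (n + PySem.Int.mod (tail - PySem.Int.mod n tail) tail) - n
      else pvLoopA n target f (tail * 10) := rfl

theorem pvLoopB_done (target : Int) (f : Nat) (ds : List Int) (s : Int) (i : Nat)
    (h : ¬ s > target) : pvLoopB target (f + 1) ds s i = ds := by
  simp only [pvLoopB]
  rw [if_neg h]

-- shared n = 0 case: digit list is empty, both sides return 0
theorem pvZeroCase (target : Int) (ht : 0 ≤ target) :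
    makeIntegerBeautiful 0 target = makeIntegerBeautiful_alt 0 target := by
  have hb : pvBuildDigits 64 0 [] = [] := by decide
  have hm1 : PySem.Int.mod (0:Int) 1 = 0 := by decide
  have hm2 : PySem.Int.mod ((1:Int) - 0) 1 = 0 := by decide
  have hB : pvLoopB target (63 + 1) [] 0 0 = [] := pvLoopB_done target 63 [] 0 0 (by omega)
  have hA : pvLoopA 0 target (63 + 1) 1 = 0 := by
    rw [pvLoopA_step, hm1, hm2]
    norm_num [pvDigitLoop_zero]
    exact fun hlt => absurd ht (by omega)
  unfold makeIntegerBeautiful makeIntegerBeautiful_alt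
  rw [hb]
  show pvLoopA 0 target (63 + 1) 1 =
    (pvLoopB target (63 + 1) [] ([] : List Int).sum 0).reverse.foldl (fun m d => m * 10 + d) 0 - 0
  rw [hA, show ([] : List Int).sum = 0 from rfl, hB]
  simp

-- ===== VERDICT (by name: the statement is the Claim_ definition above) =====
theorem makeIntegerBeautiful_spec : Claim_equal_makeIntegerBeautiful := by
  intro n target hdom hpre
  unfold Spec_makeIntegerBeautiful
  obtain ⟨hn, hcase⟩ := hpre
  rcases hcase with ht1 | ⟨hn0, ht0⟩
  · by_cases hn1 : n = 0
    · subst hn1; exact pvZeroCase target (by omega)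
    · have hdom' : pvDomInt n = true := by
        unfold Dom_makeIntegerBeautiful at hdom
        exact (Bool.and_eq_true _ _ |>.mp hdom).1
      have hnub : n ≤ 2147483648 := (of_decide_eq_true hdom').2
      have hn1' : 1 ≤ n := by omega
      obtain ⟨bok, bval, blast⟩ := pvBuild_spec 64 n hn
        (by
          have h64 : (2147483648:Int) < 10 ^ 64 := by norm_num
          omega)
      obtain ⟨hbl1, hbl2⟩ := blast (by omega)
      set ds0 := pvBuildDigits 64 n [] with hds0
      unfold makeIntegerBeautiful makeIntegerBeautiful_alt
      rw [← hds0]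
      show pvLoopA n target 64 1 =
        (pvLoopB target 64 ds0 ds0.sum 0).reverse.foldl (fun m d => m * 10 + d) 0 - n
      rw [pvReconstruct]
      have := pvMain n target hn1' hnub ht1 64 0 ds0 ds0.sum (by omega) (by omega)
        bok (by omega) (by rw [bval, pvCeilQ_zero]; ring) rfl hbl1 hbl2
      rw [pow_zero] at this
      exact this
  · subst hn0; exact pvZeroCase target ht0
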